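-- pv_equiv track=rewrite | github.com/TechMADS/SMS_project | backend/api_detector.py | check_violations
-- ===== SOURCE A (Python) =====
-- def check_violations(clothing_items):
--     """Check for dress code violations based on detected items"""
--     violations = []
--
--     # Check if person is detected
--     person_present = any('person' in item['item'] for item in clothing_items)
--     if not person_present:
--         violations.append("No person detected in frame")
--
--     # Check for tie
--     tie_present = any('tie' in item['item'] for item in clothing_items)
--     if not tie_present:
--         violations.append("Tie not detected")
--
--     # Check for formal wear
--     formal_items = ['suit', 'jacket', 'shirt']
--     formal_present = any(any(f in item['item'] for f in formal_items) for item in clothing_items)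
--     if not formal_present:
--         violations.append("Formal wear not detected")
--
--     return violations
-- ===== SOURCE B (Python) =====
-- def check_violations(clothing_items):
--     person_present = tie_present = formal_present = False
--     for item in clothing_items:
--         name = item['item']
--         if 'person' in name:
--             person_present = True
--         if 'tie' in name:
--             tie_present = True
--         if 'suit' in name or 'jacket' in name or 'shirt' in name:
--             formal_present = True
--     violations = []
--     if not person_present:
--         violations.append("No person detected in frame")
--     if not tie_present:
--         violations.append("Tie not detected")
--     if not formal_present:
--         violations.append("Formal wear not detected")
--     return violations
-- ===== Notes on version B (the rewrite author's own statement) =====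
-- stated objective: alternative
-- what changed: Replaces A's three separate any() scans (one of them nested over the formal-wear list) with a single loop over clothing_items that updates three boolean flags, emitting the violation messages from the flags afterwards.
import Mathlib
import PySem

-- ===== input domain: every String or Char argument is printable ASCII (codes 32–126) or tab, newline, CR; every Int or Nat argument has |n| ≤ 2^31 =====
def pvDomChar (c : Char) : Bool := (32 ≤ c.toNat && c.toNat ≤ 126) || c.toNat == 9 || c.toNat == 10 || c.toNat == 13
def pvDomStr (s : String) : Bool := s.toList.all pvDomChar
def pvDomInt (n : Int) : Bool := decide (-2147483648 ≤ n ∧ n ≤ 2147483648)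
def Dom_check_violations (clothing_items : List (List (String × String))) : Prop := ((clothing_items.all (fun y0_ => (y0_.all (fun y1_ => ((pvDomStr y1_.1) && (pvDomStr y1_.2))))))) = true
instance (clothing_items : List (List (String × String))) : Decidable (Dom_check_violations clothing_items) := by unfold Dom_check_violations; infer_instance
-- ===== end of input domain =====

-- B fuses A's three separate any() scans (one nested) into a single loop maintaining three boolean flags (one pass instead of three).
-- Pre_ excludes inputs where some item dict lacks the key 'item' (Python A raises KeyError there).


-- item['item'] on the assoc-list encoding of a dict: first matching key, "" if absent (Pre_ rules the absent case out)
def pyGetItem (d : List (String × String)) : String := ((d.find? (fun p => p.1 == "item")).map Prod.snd).getD ""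

-- ===== PORT A =====
def check_violations (clothing_items : List (List (String × String))) : List String :=
  let violations : List String := []
  let person_present := clothing_items.any (fun item => PySem.Str.isIn "person" (pyGetItem item))
  let violations := if !person_present then violations ++ ["No person detected in frame"] else violations
  let tie_present := clothing_items.any (fun item => PySem.Str.isIn "tie" (pyGetItem item))
  let violations := if !tie_present then violations ++ ["Tie not detected"] else violations
  let formal_items : List String := ["suit", "jacket", "shirt"]
  let formal_present := clothing_items.any (fun item => formal_items.any (fun f => PySem.Str.isIn f (pyGetItem item)))
  let violations := if !formal_present then violations ++ ["Formal wear not detected"] else violations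
  violations

-- ===== PORT B =====
def check_violations_alt (clothing_items : List (List (String × String))) : List String :=
  let flags := clothing_items.foldl (fun (acc : Bool × Bool × Bool) item =>
    (if PySem.Str.isIn "person" (pyGetItem item) then true else acc.1,
     if PySem.Str.isIn "tie" (pyGetItem item) then true else acc.2.1,
     if PySem.Str.isIn "suit" (pyGetItem item) || (PySem.Str.isIn "jacket" (pyGetItem item) || PySem.Str.isIn "shirt" (pyGetItem item)) then true else acc.2.2))
    (false, false, false)
  (if !flags.1 then ["No person detected in frame"] else []) ++
  (if !flags.2.1 then ["Tie not detected"] else []) ++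
  (if !flags.2.2 then ["Formal wear not detected"] else [])

-- ===== PRECONDITION & SPEC =====
-- Pre_ excludes exactly the inputs where some item dict lacks the key "item": Python A raises KeyError there.
def Pre_check_violations (clothing_items : List (List (String × String))) : Prop :=
  (clothing_items.all (fun item => item.any (fun p => p.1 == "item"))) = true
instance (clothing_items : List (List (String × String))) : Decidable (Pre_check_violations clothing_items) := by unfold Pre_check_violations; infer_instance
def pvWitness_check_violations : (List (List (String × String))) := [[("item", "person")], [("item", "red tie")]]

def Spec_check_violations (clothing_items : List (List (String × String))) (out : List String) : Prop := out = check_violations_alt clothing_items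
instance (clothing_items : List (List (String × String))) (out : List String) : Decidable (Spec_check_violations clothing_items out) := by unfold Spec_check_violations; infer_instance

-- ===== CLAIM (what is proved, stated in full; the proofs are below) =====
def Claim_equal_check_violations : Prop := ∀ (clothing_items : List (List (String × String))), Dom_check_violations clothing_items → Pre_check_violations clothing_items → Spec_check_violations clothing_items (check_violations clothing_items)

-- ===== LEMMAS AND PROOFS =====
-- B's single fold over three flags computes exactly the three any-scans (for arbitrary predicates).
theorem foldl_three_flags {α : Type} (P T F : α → Bool) (xs : List α) (p t f : Bool) :
    xs.foldl (fun (acc : Bool × Bool × Bool) x =>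
      (if P x then true else acc.1, if T x then true else acc.2.1, if F x then true else acc.2.2)) (p, t, f)
    = (p || xs.any P, t || xs.any T, f || xs.any F) := by
  induction xs generalizing p t f with
  | nil => simp
  | cons x xs ih =>
    simp only [List.foldl_cons, List.any_cons, ih]
    cases hp : P x <;> cases ht : T x <;> cases hf : F x <;> simp

-- ===== VERDICT (by name: the statement is the Claim_ definition above) =====
theorem check_violations_spec : Claim_equal_check_violations := by
  intro ci _ _
  unfold Spec_check_violations check_violations check_violations_alt
  rw [foldl_three_flags]
  simp only [List.any_cons, List.any_nil, Bool.or_false, Bool.false_or]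
  cases hP : ci.any (fun item => PySem.Str.isIn "person" (pyGetItem item)) <;>
  cases hT : ci.any (fun item => PySem.Str.isIn "tie" (pyGetItem item)) <;>
  cases hF : ci.any (fun item => PySem.Str.isIn "suit" (pyGetItem item) || (PySem.Str.isIn "jacket" (pyGetItem item) || PySem.Str.isIn "shirt" (pyGetItem item))) <;>
  simp [hP, hT, hF]
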